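-- pv_equiv track=rewrite | github.com/StupStuP21/TXTLab | main.py | GetMeadianLenghtOfWords
-- ===== SOURCE A (Python) =====
-- def GetMeadianLenghtOfWords(listOfWords):
--     arrayOfWords = []
--     for i in listOfWords:
--         arrayOfWords = arrayOfWords + i
--     arrayOfWords.sort(key = lambda x: len(x))
--     meanIndex = len(arrayOfWords)//2
--     MeadianLenght = len(arrayOfWords[meanIndex])
--     return MeadianLenght
-- ===== SOURCE B (Python) =====
-- def GetMeadianLenghtOfWords(listOfWords):
--     lengths = [len(w) for row in listOfWords for w in row]
--     k = len(lengths) // 2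
--     while True:
--         p = lengths[0]
--         lt = [x for x in lengths if x < p]
--         eq = [x for x in lengths if x == p]
--         gt = [x for x in lengths if x > p]
--         if k < len(lt):
--             lengths = lt
--         elif k < len(lt) + len(eq):
--             return p
--         else:
--             k -= len(lt) + len(eq)
--             lengths = gt
-- ===== Notes on version B (the rewrite author's own statement) =====
-- stated objective: faster
-- what changed: B replaces flatten-by-repeated-concatenation plus a full sort of the words with a single flattening pass into a list of lengths and a quickselect (three-way partition selection) of the (n//2)-th smallest length.
import Mathlib
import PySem

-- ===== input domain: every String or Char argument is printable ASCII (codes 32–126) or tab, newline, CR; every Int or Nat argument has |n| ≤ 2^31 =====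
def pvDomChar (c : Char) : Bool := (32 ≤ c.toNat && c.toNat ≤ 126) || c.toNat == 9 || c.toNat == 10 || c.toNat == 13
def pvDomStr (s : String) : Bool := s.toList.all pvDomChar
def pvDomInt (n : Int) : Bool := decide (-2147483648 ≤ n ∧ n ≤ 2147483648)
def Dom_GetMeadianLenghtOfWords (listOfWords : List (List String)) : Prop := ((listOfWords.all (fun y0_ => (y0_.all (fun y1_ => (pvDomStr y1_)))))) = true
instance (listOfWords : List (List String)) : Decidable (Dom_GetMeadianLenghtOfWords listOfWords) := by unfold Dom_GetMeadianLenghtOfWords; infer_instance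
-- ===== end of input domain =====

-- B flattens once into a list of word lengths and quickselects the (n//2)-th smallest length,
-- replacing A's quadratic repeated-concatenation flatten and full sort (objective: faster).


-- ===== PORT A =====
def GetMeadianLenghtOfWords (listOfWords : List (List String)) : Int :=
  let arrayOfWords := listOfWords.foldl (fun acc i => acc ++ i) []
  let sortedW := PySem.List.sorted arrayOfWords (fun x => PySem.Str.len x) false
  let meanIndex := PySem.Int.floordiv (PySem.List.len sortedW) 2
  match PySem.List.pyGet? sortedW meanIndex with
  | some w => PySem.Str.len w
  | none => 0  -- IndexError (empty list): excluded by Pre_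

-- ===== PORT B =====
-- quickselect loop of Source B: three-way partition around the first element
def pvQsel (l : List Int) (k : Nat) : Int :=
  match l with
  | [] => 0  -- lengths[0] IndexError: unreachable under Pre_
  | p :: rest =>
    let lt := (p :: rest).filter (fun x => decide (x < p))
    let eq := (p :: rest).filter (fun x => decide (x = p))
    let gt := (p :: rest).filter (fun x => decide (p < x))
    if k < lt.length then pvQsel lt k
    else if k < lt.length + eq.length then p
    else pvQsel gt (k - (lt.length + eq.length))
  termination_by l.length
  decreasing_by
    · simp only [List.filter_cons, decide_eq_true_eq, lt_irrefl, if_false]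
      have := List.length_filter_le (fun x => decide (x < p)) rest
      simp at this ⊢; omega
    · simp only [List.filter_cons, decide_eq_true_eq, lt_irrefl, if_false]
      have := List.length_filter_le (fun x => decide (p < x)) rest
      simp at this ⊢; omega

def GetMeadianLenghtOfWords_alt (listOfWords : List (List String)) : Int :=
  let lengths := (listOfWords.flatMap (fun row => row)).map (fun w => PySem.Str.len w)
  pvQsel lengths (lengths.length / 2)

-- ===== PRECONDITION & SPEC =====
-- Pre_ excludes inputs whose rows are all empty: there A raises IndexError on arrayOfWords[meanIndex].
def Pre_GetMeadianLenghtOfWords (listOfWords : List (List String)) : Prop :=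
  listOfWords.flatMap (fun row => row) ≠ []
instance (listOfWords : List (List String)) : Decidable (Pre_GetMeadianLenghtOfWords listOfWords) := by unfold Pre_GetMeadianLenghtOfWords; infer_instance
def pvWitness_GetMeadianLenghtOfWords : List (List String) := [["ab", "c"], ["def"]]

def Spec_GetMeadianLenghtOfWords (listOfWords : List (List String)) (out : Int) : Prop := out = GetMeadianLenghtOfWords_alt listOfWords
instance (listOfWords : List (List String)) (out : Int) : Decidable (Spec_GetMeadianLenghtOfWords listOfWords out) := by unfold Spec_GetMeadianLenghtOfWords; infer_instance

-- ===== CLAIM (what is proved, stated in full; the proofs are below) =====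
def Claim_equal_GetMeadianLenghtOfWords : Prop := ∀ (listOfWords : List (List String)), Dom_GetMeadianLenghtOfWords listOfWords → Pre_GetMeadianLenghtOfWords listOfWords → Spec_GetMeadianLenghtOfWords listOfWords (GetMeadianLenghtOfWords listOfWords)

-- ===== LEMMAS AND PROOFS =====

-- the three filters partition l (as a permutation)
lemma pv_partition_perm (l : List Int) (p : Int) :
    (l.filter (fun x => decide (x < p)) ++ l.filter (fun x => decide (x = p))
      ++ l.filter (fun x => decide (p < x))).Perm l := by
  have h1 : (l.filter (fun x => decide (x < p)) ++ l.filter (fun x => !decide (x < p))).Perm l :=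
    List.filter_append_perm _ l
  have h2 : ((l.filter (fun x => !decide (x < p))).filter (fun x => decide (x = p)) ++
      (l.filter (fun x => !decide (x < p))).filter (fun x => !decide (x = p))).Perm
      (l.filter (fun x => !decide (x < p))) := List.filter_append_perm _ _
  have e1 : (l.filter (fun x => !decide (x < p))).filter (fun x => decide (x = p))
      = l.filter (fun x => decide (x = p)) := by
    rw [List.filter_filter]
    apply List.filter_congr
    intro x _; by_cases h : x = p <;> simp [h]
  have e2 : (l.filter (fun x => !decide (x < p))).filter (fun x => !decide (x = p))
      = l.filter (fun x => decide (p < x)) := by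
    rw [List.filter_filter]
    apply List.filter_congr
    intro x _
    by_cases h : x = p
    · simp [h]
    · by_cases h2 : x < p <;> simp [h, h2] <;> omega
  rw [e1, e2] at h2
  rw [List.append_assoc]
  exact (List.Perm.append_left _ h2).trans h1

-- sorted(l) decomposes along a three-way partition
lemma pv_sorted_decomp (l : List Int) (p : Int) :
    PySem.List.sorted l (fun x => x) false
      = PySem.List.sorted (l.filter (fun x => decide (x < p))) (fun x => x) false
        ++ l.filter (fun x => decide (x = p))
        ++ PySem.List.sorted (l.filter (fun x => decide (p < x))) (fun x => x) false := by
  apply PySem.List.sorted_id_eq_of_perm_of_pairwise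
  · exact (List.Perm.append (List.Perm.append (PySem.List.sorted_perm _ _ _)
        (List.Perm.refl _)) (PySem.List.sorted_perm _ _ _)).trans (pv_partition_perm l p)
  · rw [List.pairwise_append, List.pairwise_append]
    refine ⟨⟨PySem.List.sorted_pairwise _ _, ?_, ?_⟩, PySem.List.sorted_pairwise _ _, ?_⟩
    · -- eq part pairwise: all its elements equal p
      refine List.pairwise_iff_forall_sublist.mpr ?_
      intro a b hs
      have hma : a ∈ [a, b] := by simp
      have hmb : b ∈ [a, b] := by simp
      have ha : a = p := by have := List.of_mem_filter (hs.subset hma); simpa using this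
      have hb : b = p := by have := List.of_mem_filter (hs.subset hmb); simpa using this
      omega
    · intro a ha b hb
      have ha' : a < p := by
        have := List.of_mem_filter ((PySem.List.mem_sorted _ _ _ _).1 ha); simpa using this
      have hb' : b = p := by
        have := List.of_mem_filter hb; simpa using this
      omega
    · intro a ha b hb
      have hb' : p < b := by
        have := List.of_mem_filter ((PySem.List.mem_sorted _ _ _ _).1 hb); simpa using this
      rcases List.mem_append.1 ha with ha | ha
      · have : a < p := by
          have := List.of_mem_filter ((PySem.List.mem_sorted _ _ _ _).1 ha); simpa using this
        omega
      · have : a = p := by have := List.of_mem_filter ha; simpa using this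
        omega

-- quickselect returns the k-th element of the sorted list
lemma pv_qsel_sorted : ∀ (n : Nat) (l : List Int), l.length ≤ n → ∀ (k : Nat), k < l.length →
    (PySem.List.sorted l (fun x => x) false)[k]? = some (pvQsel l k) := by
  intro n
  induction n with
  | zero => intro l hl k hk; omega
  | succ n ih =>
    intro l hl k hk
    match l with
    | [] => simp at hk
    | p :: rest =>
      rw [pv_sorted_decomp (p :: rest) p]
      rw [pvQsel]
      set lt := (p :: rest).filter (fun x => decide (x < p)) with hlt
      set eq := (p :: rest).filter (fun x => decide (x = p)) with heq
      set gt := (p :: rest).filter (fun x => decide (p < x)) with hgt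
      have hltlen : lt.length < (p :: rest).length := by
        rw [hlt]; simp only [List.filter_cons, decide_eq_true_eq, lt_irrefl, if_false]
        have := List.length_filter_le (fun x => decide (x < p)) rest
        simp at this ⊢; omega
      have hgtlen : gt.length < (p :: rest).length := by
        rw [hgt]; simp only [List.filter_cons, decide_eq_true_eq, lt_irrefl, if_false]
        have := List.length_filter_le (fun x => decide (p < x)) rest
        simp at this ⊢; omega
      have hsum : lt.length + eq.length + gt.length = (p :: rest).length := by
        have h := (pv_partition_perm (p :: rest) p).length_eq
        rw [← hlt, ← heq, ← hgt] at h
        simp only [List.length_append] at h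
        omega
      have hslt : (PySem.List.sorted lt (fun x => x) false).length = lt.length :=
        PySem.List.length_sorted _ _ _
      have hsgt : (PySem.List.sorted gt (fun x => x) false).length = gt.length :=
        PySem.List.length_sorted _ _ _
      by_cases h1 : k < lt.length
      · rw [if_pos h1]
        rw [List.getElem?_append_left (by rw [List.length_append, hslt]; omega)]
        rw [List.getElem?_append_left (by rw [hslt]; omega)]
        exact ih lt (by omega) k (by omega)
      · rw [if_neg h1]
        by_cases h2 : k < lt.length + eq.length
        · rw [if_pos h2]
          rw [List.getElem?_append_left (by rw [List.length_append, hslt]; omega)]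
          rw [List.getElem?_append_right (by rw [hslt]; omega)]
          rw [hslt]
          have hkin : k - lt.length < eq.length := by omega
          rw [List.getElem?_eq_getElem (by omega)]
          congr 1
          have hmem : eq[k - lt.length] ∈ eq := List.getElem_mem _
          have := List.of_mem_filter hmem
          simpa using this
        · rw [if_neg h2]
          rw [List.getElem?_append_right (by rw [List.length_append, hslt]; omega)]
          rw [List.length_append, hslt]
          have hklt' : k < lt.length + eq.length + gt.length := by
            rw [hsum]; exact hk
          exact ih gt (by omega) (k - (lt.length + eq.length)) (by omega)

-- repeated 'arrayOfWords = arrayOfWords + i' flattens the list of lists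
lemma pv_foldl_app (l : List (List String)) (acc : List String) :
    l.foldl (fun a i => a ++ i) acc = acc ++ l.flatMap (fun row => row) := by
  induction l generalizing acc with
  | nil => simp
  | cons h t ih => simp [ih]

-- sorting words by length then taking lengths = sorting the lengths
lemma pv_map_len_sorted (xs : List String) :
    (PySem.List.sorted xs (fun x => PySem.Str.len x) false).map (fun w => PySem.Str.len w)
      = PySem.List.sorted (xs.map (fun w => PySem.Str.len w)) (fun x => x) false := by
  symm
  apply PySem.List.sorted_id_eq_of_perm_of_pairwise
  · exact List.Perm.map _ (PySem.List.sorted_perm _ _ _)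
  · exact PySem.List.sorted_map_key_pairwise _ _

-- ===== VERDICT (by name: the statement is the Claim_ definition above) =====
theorem GetMeadianLenghtOfWords_spec : Claim_equal_GetMeadianLenghtOfWords := by
  intro l _ hpre
  unfold Spec_GetMeadianLenghtOfWords GetMeadianLenghtOfWords GetMeadianLenghtOfWords_alt
  simp only []
  have hfold : l.foldl (fun acc i => acc ++ i) [] = l.flatMap (fun row => row) := by
    simpa using pv_foldl_app l []
  rw [hfold]
  set arr := l.flatMap (fun row => row) with harr
  have hne : arr ≠ [] := hpre
  set sortedW := PySem.List.sorted arr (fun x => PySem.Str.len x) false with hsw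
  have hlen : sortedW.length = arr.length := PySem.List.length_sorted _ _ _
  have hpos : 0 < arr.length := List.length_pos_iff.2 hne
  set k : Nat := arr.length / 2 with hk
  have hklt : k < arr.length := by omega
  have hidx : PySem.Int.floordiv (PySem.List.len sortedW) 2 = (k : Int) := by
    rw [PySem.List.len_eq, hlen]
    exact_mod_cast PySem.Int.floordiv_natCast arr.length 2
  rw [hidx, PySem.List.pyGet?_natCast]
  have hlens : (sortedW.map (fun w => PySem.Str.len w))[k]?
      = some (pvQsel (arr.map (fun w => PySem.Str.len w)) k) := by
    rw [pv_map_len_sorted]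
    exact pv_qsel_sorted (arr.map (fun w => PySem.Str.len w)).length _ (le_refl _) k (by simpa using hklt)
  rw [List.getElem?_map] at hlens
  have hmaplen : (arr.map (fun w => PySem.Str.len w)).length = arr.length := by simp
  rw [hmaplen]
  cases hget : sortedW[k]? with
  | none => rw [hget] at hlens; simp at hlens
  | some w =>
    rw [hget] at hlens
    simp only [Option.map_some, Option.some.injEq] at hlens
    rw [hk] at hlens
    simpa [PySem.Str.len_eq] using hlens
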